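-- pv_equiv track=rewrite | github.com/fransobral/algo1-Costa | Finales Practica/final_1.py | listas_por_sector
-- ===== SOURCE A (Python) =====
-- def listas_por_sector(lista:list):
--     norte = list()
--     este = list()
--     sur = list()
--     oeste = list()
--
--     for tupla in lista:
--         if tupla[0] == "Norte":
--             norte.append(tupla)
--         elif tupla[0] == "Sur":
--             sur.append(tupla)
--         elif tupla[0] == "Oeste":
--             oeste.append(tupla)
--         elif tupla[0] == "Este":
--             este.append(tupla)
--
--     return norte,este,oeste,sur
-- ===== SOURCE B (Python) =====
-- def listas_por_sector(lista: list):
--     norte = [t for t in lista if t[0] == "Norte"]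
--     este = [t for t in lista if t[0] == "Este"]
--     oeste = [t for t in lista if t[0] == "Oeste"]
--     sur = [t for t in lista if t[0] == "Sur"]
--     return norte, este, oeste, sur
-- ===== Notes on version B (the rewrite author's own statement) =====
-- stated objective: idiomatic
-- what changed: Replaces the single accumulator loop with four chained if/elif branches by four independent filtering comprehensions, one scan per direction.
import Mathlib
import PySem

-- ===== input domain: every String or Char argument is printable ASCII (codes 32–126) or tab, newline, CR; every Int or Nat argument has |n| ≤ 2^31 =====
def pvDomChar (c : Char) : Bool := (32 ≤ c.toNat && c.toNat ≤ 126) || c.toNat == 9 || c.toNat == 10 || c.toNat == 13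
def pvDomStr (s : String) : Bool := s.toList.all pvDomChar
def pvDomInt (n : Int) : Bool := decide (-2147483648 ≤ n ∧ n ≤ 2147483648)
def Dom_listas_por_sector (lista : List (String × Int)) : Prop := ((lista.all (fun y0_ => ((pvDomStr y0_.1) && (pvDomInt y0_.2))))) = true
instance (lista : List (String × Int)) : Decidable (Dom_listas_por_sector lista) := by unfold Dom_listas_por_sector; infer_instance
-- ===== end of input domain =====

-- ===== PORT A =====
-- B: four independent filtering scans instead of one branching accumulator loop (idiomatic).
def listas_por_sector (lista : List (String × Int)) : (List (String × Int)) × (List (String × Int)) × (List (String × Int)) × (List (String × Int)) :=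
  let st := lista.foldl (fun (acc : (List (String × Int)) × (List (String × Int)) × (List (String × Int)) × (List (String × Int))) tupla =>
    if tupla.1 = "Norte" then (acc.1 ++ [tupla], acc.2.1, acc.2.2.1, acc.2.2.2)
    else if tupla.1 = "Sur" then (acc.1, acc.2.1 ++ [tupla], acc.2.2.1, acc.2.2.2)
    else if tupla.1 = "Oeste" then (acc.1, acc.2.1, acc.2.2.1 ++ [tupla], acc.2.2.2)
    else if tupla.1 = "Este" then (acc.1, acc.2.1, acc.2.2.1, acc.2.2.2 ++ [tupla])
    else acc) ([], [], [], [])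
  -- state is (norte, sur, oeste, este); return order is norte, este, oeste, sur
  (st.1, st.2.2.2, st.2.2.1, st.2.1)

-- ===== PORT B =====
def listas_por_sector_alt (lista : List (String × Int)) : (List (String × Int)) × (List (String × Int)) × (List (String × Int)) × (List (String × Int)) :=
  (lista.filter (fun t => t.1 = "Norte"),
   lista.filter (fun t => t.1 = "Este"),
   lista.filter (fun t => t.1 = "Oeste"),
   lista.filter (fun t => t.1 = "Sur"))

-- ===== PRECONDITION & SPEC =====
def Spec_listas_por_sector (lista : List (String × Int)) (out : (List (String × Int)) × (List (String × Int)) × (List (String × Int)) × (List (String × Int))) : Prop := out = listas_por_sector_alt lista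
instance (lista : List (String × Int)) (out : (List (String × Int)) × (List (String × Int)) × (List (String × Int)) × (List (String × Int))) : Decidable (Spec_listas_por_sector lista out) := by unfold Spec_listas_por_sector; infer_instance

-- ===== CLAIM (what is proved, stated in full; the proofs are below) =====
def Claim_equal_listas_por_sector : Prop := ∀ (lista : List (String × Int)), Dom_listas_por_sector lista → Spec_listas_por_sector lista (listas_por_sector lista)

-- ===== LEMMAS AND PROOFS =====

-- ===== VERDICT (by name: the statement is the Claim_ definition above) =====
set_option maxHeartbeats 1000000 in
theorem foldl_partition (lista : List (String × Int))
    (n s o e : List (String × Int)) :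
    lista.foldl (fun (acc : (List (String × Int)) × (List (String × Int)) × (List (String × Int)) × (List (String × Int))) tupla =>
      if tupla.1 = "Norte" then (acc.1 ++ [tupla], acc.2.1, acc.2.2.1, acc.2.2.2)
      else if tupla.1 = "Sur" then (acc.1, acc.2.1 ++ [tupla], acc.2.2.1, acc.2.2.2)
      else if tupla.1 = "Oeste" then (acc.1, acc.2.1, acc.2.2.1 ++ [tupla], acc.2.2.2)
      else if tupla.1 = "Este" then (acc.1, acc.2.1, acc.2.2.1, acc.2.2.2 ++ [tupla])
      else acc) (n, s, o, e)
    = (n ++ lista.filter (fun t => t.1 = "Norte"),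
       s ++ lista.filter (fun t => t.1 = "Sur"),
       o ++ lista.filter (fun t => t.1 = "Oeste"),
       e ++ lista.filter (fun t => t.1 = "Este")) := by
  induction lista generalizing n s o e with
  | nil => simp
  | cons hd tl ih =>
    simp only [List.foldl_cons, List.filter_cons]
    split_ifs with h1 h2 h3 h4 <;> rw [ih] <;>
      simp_all [List.append_assoc]

theorem listas_por_sector_spec : Claim_equal_listas_por_sector := by
  intro lista _
  unfold Spec_listas_por_sector listas_por_sector listas_por_sector_alt
  simp only [foldl_partition, List.nil_append]
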